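-- pv_equiv track=rewrite | github.com/Preenis4/PROGNUM-repo | Task7/flik.py | foobar
-- ===== SOURCE A (Python) =====
-- def foobar(N: int, M: int):
--     a, b = 0, 1
--     count = 0
--     res = []
--     while count < N:
--         a, b = b, a+b
--         if a % M == 0:
--             res.append(a)
--         count += 1
--     return res
-- ===== SOURCE B (Python) =====
-- def _fib_pair(n):
--     # returns (F(n), F(n+1)) by fast doubling
--     if n == 0:
--         return (0, 1)
--     a, b = _fib_pair(n >> 1)
--     c = a * (2 * b - a)
--     d = a * a + b * b
--     if n & 1:
--         return (d, c + d)
--     return (c, d)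
--
--
-- def foobar(N, M):
--     m = abs(M)
--     idxs = []
--     ra, rb = 0, 1
--     k = 1
--     while k <= N:
--         ra, rb = rb % m, (ra + rb) % m
--         if ra == 0:
--             idxs.append(k)
--         k += 1
--     return [_fib_pair(k)[0] for k in idxs]
-- ===== Notes on version B (the rewrite author's own statement) =====
-- stated objective: faster
-- what changed: Instead of carrying full (huge) Fibonacci bignums through every loop iteration, B scans only residues mod |M| to find the divisible indices and then computes just those Fibonacci values by fast doubling.
import Mathlib
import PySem

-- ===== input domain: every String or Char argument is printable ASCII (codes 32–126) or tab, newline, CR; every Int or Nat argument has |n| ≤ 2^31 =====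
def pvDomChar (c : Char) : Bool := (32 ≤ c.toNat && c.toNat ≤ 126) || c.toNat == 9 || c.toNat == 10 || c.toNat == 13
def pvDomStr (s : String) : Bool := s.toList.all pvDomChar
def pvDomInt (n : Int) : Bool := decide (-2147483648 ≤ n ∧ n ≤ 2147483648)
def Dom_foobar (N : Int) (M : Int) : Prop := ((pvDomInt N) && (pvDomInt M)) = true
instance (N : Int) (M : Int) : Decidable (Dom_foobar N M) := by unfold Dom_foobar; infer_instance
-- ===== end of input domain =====

-- B changes the algorithm: residue scan mod |M| picks the divisible indices, fast doubling
-- computes only those Fibonacci values (objective: faster; A drags full bignums through every step).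

-- ===== PORT A =====
-- while count < N runs exactly N.toNat times (count = 0,1,…); fuel = N.toNat is exact
def fooLoopA (M : Int) : Nat → Int → Int → List Int → List Int
  | 0, _, _, res => res
  | n+1, a, b, res =>
      let a' := b
      let b' := a + b
      let res' := if PySem.Int.mod a' M = 0 then res ++ [a'] else res
      fooLoopA M n a' b' res'

def foobar (N : Int) (M : Int) : List Int := fooLoopA M N.toNat 0 1 []

-- ===== PORT B =====
-- fast doubling _fib_pair: n >> 1 = n / 2, n & 1 = n % 2
def fibPairB : Nat → Int × Int
  | 0 => (0, 1)
  | (n+1) =>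
      let p := fibPairB ((n+1) / 2)
      let a := p.1
      let b := p.2
      let c := a * (2 * b - a)
      let d := a * a + b * b
      if (n+1) % 2 = 1 then (d, c + d) else (c, d)
  decreasing_by exact Nat.div_lt_self (Nat.succ_pos n) (by norm_num)

-- the residue-scanning while loop (k = 1 … N): collects the indices with F k ≡ 0 (mod m)
def fooScanB (m : Int) : Nat → Int → Int → Nat → List Nat → List Nat
  | 0, _, _, _, idxs => idxs
  | n+1, ra, rb, k, idxs =>
      let ra' := PySem.Int.mod rb m
      let rb' := PySem.Int.mod (ra + rb) m
      fooScanB m n ra' rb' (k+1) (if ra' = 0 then idxs ++ [k] else idxs)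

def foobar_alt (N : Int) (M : Int) : List Int :=
  let m := if M < 0 then -M else M   -- abs(M)
  let idxs := fooScanB m N.toNat 0 1 1 []
  idxs.map (fun k => (fibPairB k).1)

-- ===== PRECONDITION & SPEC =====
-- Python A raises ZeroDivisionError iff M = 0 and the loop runs (N ≥ 1); exactly those inputs are excluded.
def Pre_foobar (N : Int) (M : Int) : Prop := M ≠ 0 ∨ N < 1
instance (N : Int) (M : Int) : Decidable (Pre_foobar N M) := by unfold Pre_foobar; infer_instance
def pvWitness_foobar : Int × Int := (12, 3)

def Spec_foobar (N : Int) (M : Int) (out : List Int) : Prop := out = foobar_alt N M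
instance (N : Int) (M : Int) (out : List Int) : Decidable (Spec_foobar N M out) := by unfold Spec_foobar; infer_instance

-- ===== CLAIM (what is proved, stated in full; the proofs are below) =====
def Claim_equal_foobar : Prop := ∀ (N : Int) (M : Int), Dom_foobar N M → Pre_foobar N M → Spec_foobar N M (foobar N M)

-- ===== LEMMAS AND PROOFS =====
def pvF (k : Nat) : Int := (Nat.fib k : Int)

lemma pvF_add_two (k : Nat) : pvF (k + 2) = pvF k + pvF (k + 1) := by
  simp [pvF, Nat.fib_add_two]

lemma fibPairB_eq (n : Nat) : fibPairB n = (pvF n, pvF (n + 1)) := by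
  induction n using Nat.strong_induction_on with
  | _ n ih =>
    match n with
    | 0 => simp [fibPairB, pvF]
    | (n+1) =>
      have hlt : (n+1) / 2 < n + 1 := Nat.div_lt_self (Nat.succ_pos n) (by norm_num)
      have h := ih ((n+1) / 2) hlt
      rw [fibPairB, h]
      set h2 := (n+1) / 2 with hh2
      have hle : Nat.fib h2 ≤ 2 * Nat.fib (h2 + 1) := by
        have := Nat.fib_le_fib_succ (n := h2); omega
      have hfib2 : pvF (2 * h2) = pvF h2 * (2 * pvF (h2 + 1) - pvF h2) := by
        simp only [pvF]; rw [Nat.fib_two_mul]; push_cast [hle]; ring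
      have hfib1 : pvF (2 * h2 + 1) = pvF h2 * pvF h2 + pvF (h2 + 1) * pvF (h2 + 1) := by
        simp only [pvF]; rw [Nat.fib_two_mul_add_one]; push_cast; ring
      by_cases hpar : (n+1) % 2 = 1
      · have hn : n + 1 = 2 * h2 + 1 := by omega
        have hA1 : pvF (n+1) = pvF h2 * pvF h2 + pvF (h2+1) * pvF (h2+1) := by
          rw [hn]; exact hfib1
        have hA2 : pvF (n+1+1) = pvF h2 * (2 * pvF (h2+1) - pvF h2) +
            (pvF h2 * pvF h2 + pvF (h2+1) * pvF (h2+1)) := by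
          have e : n + 1 + 1 = 2 * h2 + 2 := by omega
          rw [e, pvF_add_two (2*h2), hfib2, hfib1]
        rw [if_pos hpar]
        refine Prod.ext ?_ ?_
        · show pvF h2 * pvF h2 + pvF (h2+1) * pvF (h2+1) = pvF (n+1)
          exact hA1.symm
        · show pvF h2 * (2 * pvF (h2+1) - pvF h2) +
              (pvF h2 * pvF h2 + pvF (h2+1) * pvF (h2+1)) = pvF (n+1+1)
          exact hA2.symm
      · have hn : n + 1 = 2 * h2 := by omega
        have hA1 : pvF (n+1) = pvF h2 * (2 * pvF (h2+1) - pvF h2) := by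
          rw [hn]; exact hfib2
        have hA2 : pvF (n+1+1) = pvF h2 * pvF h2 + pvF (h2+1) * pvF (h2+1) := by
          have e : n + 1 + 1 = 2 * h2 + 1 := by omega
          rw [e]; exact hfib1
        rw [if_neg hpar]
        refine Prod.ext ?_ ?_
        · show pvF h2 * (2 * pvF (h2+1) - pvF h2) = pvF (n+1)
          exact hA1.symm
        · show pvF h2 * pvF h2 + pvF (h2+1) * pvF (h2+1) = pvF (n+1+1)
          exact hA2.symm

-- Python % keeps congruence: mod a m ≡ a (mod m), for every m
lemma pvMod_modEq (a m : Int) : PySem.Int.mod a m ≡ a [ZMOD m] := by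
  have h := PySem.Int.floordiv_mul_add_mod a m
  refine Int.modEq_iff_dvd.2 ?_
  have he : a - PySem.Int.mod a m = PySem.Int.floordiv a m * m := by linarith
  rw [he]
  exact dvd_mul_left m _

lemma pvModEq_dvd_iff {a b m : Int} (h : a ≡ b [ZMOD m]) : m ∣ a ↔ m ∣ b := by
  constructor
  · intro hd
    exact (Int.modEq_zero_iff_dvd).1 (h.symm.trans ((Int.modEq_zero_iff_dvd).2 hd))
  · intro hd
    exact (Int.modEq_zero_iff_dvd).1 (h.trans ((Int.modEq_zero_iff_dvd).2 hd))

-- scan loop characterization: it collects exactly the indices with m ∣ F i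
lemma fooScanB_eq (m : Int) (n : Nat) :
    ∀ (j : Nat) (ra rb : Int) (idxs : List Nat),
    ra ≡ pvF j [ZMOD m] → rb ≡ pvF (j + 1) [ZMOD m] →
    fooScanB m n ra rb (j + 1) idxs =
      idxs ++ (List.range' (j + 1) n).filter (fun i => decide (m ∣ pvF i)) := by
  induction n with
  | zero => intro j ra rb idxs _ _; simp [fooScanB]
  | succ n ih =>
    intro j ra rb idxs hra hrb
    simp only [fooScanB]
    have hra' : PySem.Int.mod rb m ≡ pvF (j + 1) [ZMOD m] := (pvMod_modEq rb m).trans hrb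
    have hrb' : PySem.Int.mod (ra + rb) m ≡ pvF (j + 1 + 1) [ZMOD m] := by
      have hsum : ra + rb ≡ pvF j + pvF (j + 1) [ZMOD m] := hra.add hrb
      have e : j + 1 + 1 = j + 2 := by omega
      rw [e, pvF_add_two]
      exact (pvMod_modEq (ra + rb) m).trans hsum
    have htest : (PySem.Int.mod rb m = 0) ↔ m ∣ pvF (j + 1) := by
      rw [PySem.Int.mod_eq_zero_iff_dvd]
      exact pvModEq_dvd_iff hrb
    rw [List.range'_succ, List.filter_cons]
    by_cases hz : PySem.Int.mod rb m = 0
    · have hd : m ∣ pvF (j + 1) := htest.1 hz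
      rw [if_pos hz,
        ih (j + 1) (PySem.Int.mod rb m) (PySem.Int.mod (ra + rb) m) (idxs ++ [j + 1]) hra' hrb']
      simp [hd]
    · have hd : ¬ m ∣ pvF (j + 1) := fun h => hz (htest.2 h)
      rw [if_neg hz,
        ih (j + 1) (PySem.Int.mod rb m) (PySem.Int.mod (ra + rb) m) idxs hra' hrb']
      simp [hd]

-- A's loop characterization: filter-then-map form
lemma fooLoopA_eq (M : Int) (n : Nat) :
    ∀ (k : Nat) (res : List Int),
    fooLoopA M n (pvF k) (pvF (k + 1)) res =
      res ++ ((List.range' (k + 1) n).filter (fun i => decide (M ∣ pvF i))).map pvF := by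
  induction n with
  | zero => intro k res; simp [fooLoopA]
  | succ n ih =>
    intro k res
    simp only [fooLoopA]
    have hstep : pvF k + pvF (k + 1) = pvF (k + 2) := (pvF_add_two k).symm
    have htest : (PySem.Int.mod (pvF (k + 1)) M = 0) ↔ M ∣ pvF (k + 1) :=
      PySem.Int.mod_eq_zero_iff_dvd _ _
    rw [hstep, List.range'_succ, List.filter_cons]
    by_cases hd : M ∣ pvF (k + 1)
    · rw [if_pos (htest.2 hd)]
      have hrec := ih (k + 1) (res ++ [pvF (k + 1)])
      simp only [show k + 1 + 1 = k + 2 by omega] at hrec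
      rw [hrec]
      simp [hd]
    · rw [if_neg (fun h => hd (htest.1 h))]
      have hrec := ih (k + 1) res
      simp only [show k + 1 + 1 = k + 2 by omega] at hrec
      rw [hrec]
      simp [hd]

lemma abs_dvd_iff (M x : Int) : ((if M < 0 then -M else M) ∣ x) ↔ (M ∣ x) := by
  split_ifs with h
  · exact neg_dvd
  · exact Iff.rfl

-- ===== VERDICT (by name: the statement is the Claim_ definition above) =====
theorem foobar_spec : Claim_equal_foobar := by
  intro N M _ _
  show foobar N M = foobar_alt N M
  unfold foobar foobar_alt
  set m := if M < 0 then -M else M with hm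
  show fooLoopA M N.toNat 0 1 [] =
    (fooScanB m N.toNat 0 1 1 []).map (fun k => (fibPairB k).1)
  have h0 : (0 : Int) = pvF 0 := by simp [pvF]
  have h1 : (1 : Int) = pvF 1 := by simp [pvF]
  have hB : fooScanB m N.toNat 0 1 1 [] =
      (List.range' 1 N.toNat).filter (fun i => decide (m ∣ pvF i)) := by
    have := fooScanB_eq m N.toNat 0 0 1 [] (by simp [pvF]) (by simp [pvF])
    simpa using this
  conv_lhs => rw [h0, h1]
  rw [fooLoopA_eq M N.toNat 0 [], hB]
  have hfilter : (List.range' 1 N.toNat).filter (fun i => decide (m ∣ pvF i)) =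
      (List.range' 1 N.toNat).filter (fun i => decide (M ∣ pvF i)) := by
    apply List.filter_congr
    intro i _
    rw [hm]
    simp [abs_dvd_iff]
  rw [hfilter]
  simp only [List.nil_append]
  apply List.map_congr_left
  intro i _
  simp [fibPairB_eq]
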